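-- pv_equiv track=rewrite | github.com/xuanxuange/Question-Answering-System | src/question_generation/question_gen_preprocess.py | remove_q_dups
-- ===== SOURCE A (Python) =====
-- def remove_q_dups(ql, t_order):
-- 	t_order = list(reversed(t_order))
-- 	out = {}
-- 	res = []
-- 	for q in ql:
-- 		qtext = q[4:]
-- 		ttext = q[:2]
-- 		if qtext in out:
-- 			ttext_2 = out[qtext]
-- 			try: #Skip if tags are incomparable
-- 				if t_order.index(ttext) > t_order.index(ttext_2):
-- 					out[qtext] = ttext
-- 			except:
-- 				pass
-- 		else:
-- 			out[qtext] = ttext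
--
-- 	for qtext in out:
-- 		res.append(out[qtext]+": "+qtext)
-- 	return res
-- ===== SOURCE B (Python) =====
-- def remove_q_dups(ql, t_order):
--     t_order = list(reversed(t_order))
--     # pass 1: group tags (q[:2]) by question text (q[4:]), insertion order
--     groups = {}
--     for q in ql:
--         groups.setdefault(q[4:], []).append(q[:2])
--     # pass 2: reduce each group to its best tag, seeded with the first-seen tag
--     res = []
--     for qtext, tags in groups.items():
--         best = tags[0]
--         for t in tags[1:]:
--             try:  # skip incomparable tags
--                 if t_order.index(t) > t_order.index(best):
--                     best = t
--             except ValueError: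
--                 pass
--         res.append(best + ": " + qtext)
--     return res
-- ===== Notes on version B (the rewrite author's own statement) =====
-- stated objective: alternative
-- what changed: Replaces A's interleaved running-best-in-a-single-dict loop by a two-pass shape: one pass groups all tags per question text into an insertion-ordered dict of lists, a second pass folds each group down to its best tag and emits the result.
import Mathlib
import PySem

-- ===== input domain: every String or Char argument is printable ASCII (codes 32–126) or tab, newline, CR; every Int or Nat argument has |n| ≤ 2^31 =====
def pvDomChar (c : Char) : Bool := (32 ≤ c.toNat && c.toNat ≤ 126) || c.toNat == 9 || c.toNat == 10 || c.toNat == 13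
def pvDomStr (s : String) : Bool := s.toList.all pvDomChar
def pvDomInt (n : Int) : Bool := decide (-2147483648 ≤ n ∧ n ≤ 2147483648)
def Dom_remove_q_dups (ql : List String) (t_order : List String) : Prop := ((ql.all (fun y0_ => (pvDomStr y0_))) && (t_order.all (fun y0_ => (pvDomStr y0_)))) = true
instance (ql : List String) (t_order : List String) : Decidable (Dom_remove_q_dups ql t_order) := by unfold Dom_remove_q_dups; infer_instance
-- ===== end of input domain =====

-- B replaces A's interleaved running-best dict loop by a two-pass shape (group tags per text, then reduce each group); same cost, alternative decomposition.


-- ===== PORT A =====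
-- one iteration of A's main loop: running dict qtext -> best tag so far
def pvStepA (ord : List String) (out : PySem.Dict String String) (q : String) : PySem.Dict String String :=
  let qtext := PySem.Str.slice q (some 4) none
  let ttext := PySem.Str.slice q none (some 2)
  match out.get? qtext with
  | some ttext2 =>
    -- try: if t_order.index(ttext) > t_order.index(ttext_2): out[qtext] = ttext  except: pass
    match PySem.List.index? ord ttext, PySem.List.index? ord ttext2 with
    | some i, some j => if j < i then out.insert qtext ttext else out
    | _, _ => out
  | none => out.insert qtext ttext

def remove_q_dups (ql : List String) (t_order : List String) : List String :=
  let ord := t_order.reverse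
  let out := ql.foldl (pvStepA ord) PySem.Dict.empty
  -- for qtext in out: res.append(out[qtext]+": "+qtext)  (the key is always present, so out[qtext] is getD with any default)
  out.keys.foldl (fun res qtext => res ++ [out.getD qtext "" ++ ": " ++ qtext]) []

-- ===== PORT B =====
-- B's inner reduction step: replace best by t only when both are in ord and t ranks higher
def pvBest (ord : List String) (best t : String) : String :=
  match PySem.List.index? ord t, PySem.List.index? ord best with
  | some i, some j => if j < i then t else best
  | _, _ => best

-- B's pass 1 body: groups.setdefault(q[4:], []).append(q[:2])
def pvGrp (d : PySem.Dict String (List String)) (q : String) : PySem.Dict String (List String) :=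
  d.modify (PySem.Str.slice q (some 4) none) [] (fun ts => ts ++ [PySem.Str.slice q none (some 2)])

def remove_q_dups_alt (ql : List String) (t_order : List String) : List String :=
  let ord := t_order.reverse
  let groups := ql.foldl pvGrp PySem.Dict.empty
  groups.items.foldl (fun res p =>
    match p.2 with
    | [] => res  -- unreachable: every group holds at least one tag
    | t0 :: ts => res ++ [ts.foldl (pvBest ord) t0 ++ ": " ++ p.1]) []

-- ===== PRECONDITION & SPEC =====
def Spec_remove_q_dups (ql : List String) (t_order : List String) (out : List String) : Prop := out = remove_q_dups_alt ql t_order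
instance (ql : List String) (t_order : List String) (out : List String) : Decidable (Spec_remove_q_dups ql t_order out) := by unfold Spec_remove_q_dups; infer_instance

-- ===== CLAIM (what is proved, stated in full; the proofs are below) =====
def Claim_equal_remove_q_dups : Prop := ∀ (ql : List String) (t_order : List String), Dom_remove_q_dups ql t_order → Spec_remove_q_dups ql t_order (remove_q_dups ql t_order)

-- ===== LEMMAS AND PROOFS =====

-- reduce a group of tags exactly as B's inner loop does ("" is never used: groups are nonempty)
def pvRed (ord : List String) (tags : List String) : String :=
  match tags with
  | [] => ""
  | t0 :: ts => ts.foldl (pvBest ord) t0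

-- value-wise image of B's group dict under pvRed: what A's running dict is at every point
def pvMap (ord : List String) (d : PySem.Dict String (List String)) : PySem.Dict String String :=
  PySem.Dict.mk (d.items.map (fun p => (p.1, pvRed ord p.2)))

theorem pvRed_append (ord : List String) (t0 t : String) (ts : List String) :
    pvRed ord (t0 :: (ts ++ [t])) = pvBest ord (pvRed ord (t0 :: ts)) t := by
  simp [pvRed, List.foldl_append]

theorem pvMap_get? (ord : List String) (d : PySem.Dict String (List String)) (k : String) :
    (pvMap ord d).get? k = (d.get? k).map (pvRed ord) := by
  simp [pvMap, PySem.Dict.get?, List.find?_map, Function.comp_def, Option.map_map]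

theorem pvMap_keys (ord : List String) (d : PySem.Dict String (List String)) :
    (pvMap ord d).keys = d.keys := by
  simp [pvMap, PySem.Dict.keys, List.map_map, Function.comp_def]

theorem pvMap_insert (ord : List String) (d : PySem.Dict String (List String)) (k : String) (v : List String) :
    pvMap ord (d.insert k v) = (pvMap ord d).insert k (pvRed ord v) := by
  have hcm : ∀ (ν : Type) (g : List String → ν),
      (PySem.Dict.mk (d.items.map (fun p => (p.1, g p.2)))).contains k = d.contains k := by
    intro ν g
    simp [PySem.Dict.contains, List.any_map, Function.comp_def]
  by_cases hc : d.contains k = true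
  · have hc' : (PySem.Dict.mk (d.items.map (fun p => (p.1, pvRed ord p.2)))).contains k = true :=
      (hcm _ _).trans hc
    simp only [pvMap, PySem.Dict.insert, hc, hc', if_pos, List.map_map, PySem.Dict.items]
    congr 1
    refine List.map_congr_left (fun p _ => ?_)
    by_cases hk : p.1 = k <;> simp [hk]
  · have hc' : ¬ (PySem.Dict.mk (d.items.map (fun p => (p.1, pvRed ord p.2)))).contains k = true := by
      rw [hcm]; exact hc
    simp only [pvMap, PySem.Dict.insert, hc, hc', if_neg, List.map_append, List.map_cons,
      List.map_nil, PySem.Dict.items, Bool.false_eq_true, not_false_iff, if_false]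


-- with unique keys, find? of a member's key returns exactly that member
theorem find_key_of_mem {ν : Type} (items : List (String × ν)) (p : String × ν)
    (hnd : (items.map (fun x => x.1)).Nodup) (hp : p ∈ items) :
    items.find? (fun r => r.1 == p.1) = some p := by
  induction items with
  | nil => cases hp
  | cons r rest ih =>
    rw [List.map_cons] at hnd
    have h1 : r.1 ∉ rest.map (fun x => x.1) := (List.nodup_cons.mp hnd).1
    have h2 : (rest.map (fun x => x.1)).Nodup := (List.nodup_cons.mp hnd).2
    rcases List.mem_cons.mp hp with h | h
    · subst h; exact List.find?_cons_of_pos (by simp)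
    · have hr : ¬ r.1 = p.1 := fun he => h1 (he ▸ List.mem_map.mpr ⟨p, h, rfl⟩)
      rw [List.find?_cons_of_neg (by simpa using hr)]
      exact ih h2 h

theorem get?_of_mem_nodup {ν : Type} (d : PySem.Dict String ν) (p : String × ν)
    (hnd : d.keys.Nodup) (hp : p ∈ d.items) : d.get? p.1 = some p.2 := by
  simp [PySem.Dict.get?, find_key_of_mem d.items p hnd hp]

-- inserting a dict's own value at its key is a no-op when keys are unique
theorem insert_get_self {ν : Type} (d : PySem.Dict String ν) (k : String) (v : ν)
    (hnd : d.keys.Nodup) (hv : d.get? k = some v) : d.insert k v = d := by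
  obtain ⟨pr, hfind, hv2⟩ : ∃ pr, d.items.find? (fun r => r.1 == k) = some pr ∧ pr.2 = v := by
    simpa [PySem.Dict.get?, Option.map_eq_some_iff] using hv
  have hk : pr.1 = k := by simpa using List.find?_some hfind
  have hmem : pr ∈ d.items := List.mem_of_find?_eq_some hfind
  have hc : d.contains k = true := by
    simp only [PySem.Dict.contains, List.any_eq_true]
    exact ⟨pr, hmem, by simp [hk]⟩
  have hnd' : (d.items.map (fun x => x.1)).Nodup := hnd
  apply PySem.Dict.ext
  simp only [PySem.Dict.insert, hc, if_pos, PySem.Dict.items]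
  nth_rewrite 2 [← List.map_id d.items]
  refine List.map_congr_left (fun p hpm => ?_)
  by_cases hpk : p.1 = k
  · have hpe : p = pr := List.inj_on_of_nodup_map hnd' hpm hmem (by rw [hpk, hk])
    have hprv : pr = (k, v) := Prod.ext hk hv2
    simp [hpk, hpe, hprv]
  · simp [hpk]


-- keys stay unique through insert
theorem nodup_keys_insert {ν : Type} (d : PySem.Dict String ν) (k : String) (v : ν)
    (hnd : d.keys.Nodup) : (d.insert k v).keys.Nodup := by
  by_cases hc : d.contains k = true
  · have : (d.insert k v).keys = d.keys := by
      simp only [PySem.Dict.insert, hc, if_pos, PySem.Dict.keys, PySem.Dict.items, List.map_map]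
      refine List.map_congr_left (fun p _ => ?_)
      by_cases hk : p.1 = k <;> simp [Function.comp_def, hk]
    rw [this]; exact hnd
  · have hnm : k ∉ d.keys := by
      intro hmem
      rcases List.mem_map.mp hmem with ⟨p, hp, hpe⟩
      exact hc (by
        simp only [PySem.Dict.contains, List.any_eq_true]
        exact ⟨p, hp, by simp [hpe]⟩)
    have hkeys : (d.insert k v).keys = d.keys ++ [k] := by
      simp [PySem.Dict.insert, hc, PySem.Dict.keys]
    rw [hkeys]
    exact List.Nodup.append hnd (List.nodup_singleton k) (by simpa using hnm)


-- every item of insert is an old item or the inserted pair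
theorem mem_items_insert {ν : Type} (d : PySem.Dict String ν) (k : String) (v : ν)
    (p : String × ν) (hp : p ∈ (d.insert k v).items) : p ∈ d.items ∨ p = (k, v) := by
  by_cases hc : d.contains k = true
  · simp only [PySem.Dict.insert, hc, if_pos] at hp
    rcases List.mem_map.mp hp with ⟨r, hr, hre⟩
    by_cases hk : (r.1 == k) = true
    · right; simp only [hk, if_pos] at hre; exact hre.symm
    · left; simp only [hk, if_neg, Bool.false_eq_true, not_false_iff] at hre; exact hre ▸ hr
  · simp only [PySem.Dict.insert, hc, if_neg, Bool.false_eq_true, not_false_iff] at hp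
    rcases List.mem_append.mp hp with h | h
    · exact Or.inl h
    · exact Or.inr (by simpa using h)

-- one step of A on the pvRed image equals the pvRed image of one step of B's grouping pass
theorem step_comm (ord : List String) (d : PySem.Dict String (List String)) (q : String)
    (hnd : d.keys.Nodup) (h : ∀ p ∈ d.items, p.2 ≠ []) :
    pvStepA ord (pvMap ord d) q = pvMap ord (pvGrp d q) := by
  set k := PySem.Str.slice q (some 4) none with hk
  set t := PySem.Str.slice q none (some 2) with ht
  cases hg : d.get? k with
  | none =>
    have hgm : (pvMap ord d).get? k = none := by rw [pvMap_get?, hg]; rfl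
    have : pvGrp d q = d.insert k [t] := by
      simp [pvGrp, PySem.Dict.modify, PySem.Dict.getD, hg, ← hk, ← ht]
    rw [this, pvMap_insert]
    simp [pvStepA, hgm, ← hk, ← ht, pvRed]
  | some tags =>
    obtain ⟨pr, hfind, hv2⟩ : ∃ pr, d.items.find? (fun r => r.1 == k) = some pr ∧ pr.2 = tags := by
      simpa [PySem.Dict.get?, Option.map_eq_some_iff] using hg
    have htags : tags ≠ [] := hv2 ▸ h pr (List.mem_of_find?_eq_some hfind)
    obtain ⟨t0, ts, rfl⟩ : ∃ t0 ts, tags = t0 :: ts := by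
      cases tags with
      | nil => exact absurd rfl htags
      | cons a b => exact ⟨a, b, rfl⟩
    have hgm : (pvMap ord d).get? k = some (pvRed ord (t0 :: ts)) := by
      rw [pvMap_get?, hg]; rfl
    have hgrp : pvGrp d q = d.insert k (t0 :: (ts ++ [t])) := by
      simp [pvGrp, PySem.Dict.modify, PySem.Dict.getD, hg, ← hk, ← ht]
    have hndm : (pvMap ord d).keys.Nodup := by rw [pvMap_keys]; exact hnd
    rw [hgrp, pvMap_insert, pvRed_append]
    simp only [pvStepA, ← hk, ← ht, hgm]
    unfold pvBest
    cases hi : PySem.List.index? ord t with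
    | none =>
      cases hj : PySem.List.index? ord (pvRed ord (t0 :: ts)) with
      | none => exact (insert_get_self _ _ _ hndm hgm).symm
      | some j => exact (insert_get_self _ _ _ hndm hgm).symm
    | some i =>
      cases hj : PySem.List.index? ord (pvRed ord (t0 :: ts)) with
      | none => exact (insert_get_self _ _ _ hndm hgm).symm
      | some j =>
        by_cases hlt : j < i
        · simp [hlt]
        · simp only [hlt, if_neg, not_false_iff, if_false]
          exact (insert_get_self _ _ _ hndm hgm).symm

-- pvGrp preserves the invariants
theorem pvGrp_nodup (d : PySem.Dict String (List String)) (q : String)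
    (hnd : d.keys.Nodup) : (pvGrp d q).keys.Nodup :=
  nodup_keys_insert _ _ _ hnd

theorem pvGrp_nonempty (d : PySem.Dict String (List String)) (q : String)
    (h : ∀ p ∈ d.items, p.2 ≠ []) : ∀ p ∈ (pvGrp d q).items, p.2 ≠ [] := by
  intro p hp
  rcases mem_items_insert _ _ _ p hp with hm | he
  · exact h p hm
  · subst he; simp

-- main loop invariant: A's fold is the pvRed image of B's grouping fold
theorem loop_inv (ord : List String) (l : List String) (d : PySem.Dict String (List String))
    (hnd : d.keys.Nodup) (h : ∀ p ∈ d.items, p.2 ≠ []) :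
    l.foldl (pvStepA ord) (pvMap ord d) = pvMap ord (l.foldl pvGrp d) := by
  induction l generalizing d with
  | nil => rfl
  | cons q l ih =>
    simp only [List.foldl_cons]
    rw [step_comm ord d q hnd h]
    exact ih (pvGrp d q) (pvGrp_nodup d q hnd) (pvGrp_nonempty d q h)

theorem fold_props (l : List String) :
    (l.foldl pvGrp PySem.Dict.empty).keys.Nodup ∧
    ∀ p ∈ (l.foldl pvGrp PySem.Dict.empty).items, p.2 ≠ [] := by
  suffices H : ∀ (d : PySem.Dict String (List String)), d.keys.Nodup →
      (∀ p ∈ d.items, p.2 ≠ []) →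
      (l.foldl pvGrp d).keys.Nodup ∧ ∀ p ∈ (l.foldl pvGrp d).items, p.2 ≠ [] by
    exact H PySem.Dict.empty (by simp [PySem.Dict.empty, PySem.Dict.keys]) (by simp [PySem.Dict.empty])
  induction l with
  | nil => exact fun d hnd h => ⟨hnd, h⟩
  | cons q l ih =>
    intro d hnd h
    exact ih (pvGrp d q) (pvGrp_nodup d q hnd) (pvGrp_nonempty d q h)

-- ===== VERDICT (by name: the statement is the Claim_ definition above) =====
theorem remove_q_dups_spec : Claim_equal_remove_q_dups := by
  intro ql t_order _
  simp only [Spec_remove_q_dups, remove_q_dups, remove_q_dups_alt]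
  set ord := t_order.reverse with hord
  obtain ⟨hnd, hne⟩ := fold_props ql
  set G := ql.foldl pvGrp PySem.Dict.empty with hG
  have hout : ql.foldl (pvStepA ord) PySem.Dict.empty = pvMap ord G := by
    have : (PySem.Dict.empty : PySem.Dict String String) = pvMap ord PySem.Dict.empty := rfl
    rw [this]
    exact loop_inv ord ql PySem.Dict.empty (by simp [PySem.Dict.empty, PySem.Dict.keys])
      (by simp [PySem.Dict.empty])
  rw [hout]
  -- A side: fold over keys becomes a map over items
  have hkeys : (pvMap ord G).keys = G.items.map (fun x => x.1) := by
    rw [pvMap_keys]; rfl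
  rw [hkeys, PySem.List.foldl_append_singleton_eq_map
    (fun qtext => (pvMap ord G).getD qtext "" ++ ": " ++ qtext) (G.items.map (fun x => x.1)) []]
  -- B side: the match body equals appending the reduced tag, for every item
  rw [PySem.List.foldl_congr_mem G.items _
    (fun res p => res ++ [pvRed ord p.2 ++ ": " ++ p.1]) []
    (by
      intro acc p hp
      have := hne p hp
      cases hpp : p.2 with
      | nil => exact absurd hpp this
      | cons t0 ts => simp [hpp, pvRed])]
  rw [PySem.List.foldl_append_singleton_eq_map (fun p => pvRed ord p.2 ++ ": " ++ p.1) G.items []]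
  simp only [List.nil_append, List.map_map]
  refine List.map_congr_left (fun p hp => ?_)
  have hget : (pvMap ord G).get? p.1 = some (pvRed ord p.2) := by
    rw [pvMap_get?, get?_of_mem_nodup G p hnd hp]; rfl
  simp [Function.comp_def, PySem.Dict.getD, hget]
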